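-- pv_equiv track=rewrite | github.com/cnorthwood/adventofcode | 2025/06/challenge.py | discover_column_widths
-- ===== SOURCE A (Python) =====
-- def discover_column_widths(line):
--     column_widths = []
--     this_column_width = 1
--     for c in line:
--         if c in {"*", "+"}:
--             column_widths.append(this_column_width - 1)
--             this_column_width = 0
--         this_column_width += 1
--     column_widths.append(this_column_width)
--     return column_widths[1:]
-- ===== SOURCE B (Python) =====
-- def discover_column_widths(line):
--     positions = [i for i, c in enumerate(line) if c in ("*", "+")]
--     if not positions:
--         return []
--     widths = [b - a - 1 for a, b in zip(positions, positions[1:])]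
--     widths.append(len(line) - positions[-1])
--     return widths
-- ===== Notes on version B (the rewrite author's own statement) =====
-- stated objective: alternative
-- what changed: Replaces A's streaming width accumulator (reset on each delimiter, then drop the first element) by first building the list of delimiter positions and then computing consecutive position differences plus a trailing len(line)-last term.
import Mathlib
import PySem

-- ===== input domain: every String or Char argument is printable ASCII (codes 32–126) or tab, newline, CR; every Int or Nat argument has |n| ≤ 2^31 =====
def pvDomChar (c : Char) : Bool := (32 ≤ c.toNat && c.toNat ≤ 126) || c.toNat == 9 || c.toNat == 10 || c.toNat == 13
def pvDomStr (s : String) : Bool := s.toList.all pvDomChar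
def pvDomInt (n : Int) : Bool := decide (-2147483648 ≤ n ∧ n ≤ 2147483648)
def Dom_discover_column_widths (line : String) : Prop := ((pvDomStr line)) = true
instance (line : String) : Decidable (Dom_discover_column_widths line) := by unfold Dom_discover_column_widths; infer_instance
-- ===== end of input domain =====

-- B computes the same widths from an index table of delimiter positions instead of A's streaming accumulator (alternative decomposition, same cost).

-- ===== PORT A =====
def discover_column_widths (line : String) : List Int :=
  let r := line.toList.foldl (fun (st : List Int × Int) c =>
      let st' := if c = '*' ∨ c = '+' then (st.1 ++ [st.2 - 1], (0 : Int)) else st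
      (st'.1, st'.2 + 1)) ([], 1)
  (r.1 ++ [r.2]).drop 1

-- ===== PORT B =====
def discover_column_widths_alt (line : String) : List Int :=
  let cs := line.toList
  let positions : List Int := (PySem.List.enumerate cs 0).filterMap
    (fun ic => if ic.2 = '*' ∨ ic.2 = '+' then some ic.1 else none)
  match positions with
  | [] => []
  | p :: ps =>
      ((p :: ps).zip ps).map (fun ab => ab.2 - ab.1 - 1)
        ++ [(cs.length : Int) - (p :: ps).getLast (by simp)]

-- ===== PRECONDITION & SPEC =====
def Spec_discover_column_widths (line : String) (out : List Int) : Prop := out = discover_column_widths_alt line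
instance (line : String) (out : List Int) : Decidable (Spec_discover_column_widths line out) := by unfold Spec_discover_column_widths; infer_instance

-- ===== CLAIM (what is proved, stated in full; the proofs are below) =====
def Claim_equal_discover_column_widths : Prop := ∀ (line : String), Dom_discover_column_widths line → Spec_discover_column_widths line (discover_column_widths line)

-- ===== LEMMAS AND PROOFS =====

-- A's loop, as structural recursion on the remaining characters with current width w.
def pvSpecA : List Char → Int → List Int × Int
  | [], w => ([], w)
  | c :: cs, w =>
      if c = '*' ∨ c = '+' then
        let r := pvSpecA cs 1
        ((w - 1) :: r.1, r.2)
      else pvSpecA cs (w + 1)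

-- delimiter positions, recursively
def pvPos : List Char → List Int
  | [] => []
  | c :: cs =>
      if c = '*' ∨ c = '+' then 0 :: (pvPos cs).map (· + 1)
      else (pvPos cs).map (· + 1)

-- consecutive differences minus one
def pvDiffsL (l : List Int) : List Int := (l.zip l.tail).map (fun ab => ab.2 - ab.1 - 1)

lemma pvDiffsL_cons_cons (a b : Int) (t : List Int) :
    pvDiffsL (a :: b :: t) = (b - a - 1) :: pvDiffsL (b :: t) := rfl

lemma pvFoldA (cs : List Char) : ∀ (acc : List Int) (w : Int),
    cs.foldl (fun (st : List Int × Int) c =>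
      let st' := if c = '*' ∨ c = '+' then (st.1 ++ [st.2 - 1], (0 : Int)) else st
      (st'.1, st'.2 + 1)) (acc, w)
    = (acc ++ (pvSpecA cs w).1, (pvSpecA cs w).2) := by
  induction cs with
  | nil => intro acc w; simp [pvSpecA]
  | cons c cs ih =>
      intro acc w
      by_cases h : c = '*' ∨ c = '+'
      · simp [List.foldl_cons, h, pvSpecA, ih]
      · simp [List.foldl_cons, h, pvSpecA, ih]

lemma pvDiffsL_map_add_one (l : List Int) : pvDiffsL (l.map (· + 1)) = pvDiffsL l := by
  unfold pvDiffsL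
  rw [← List.map_tail, List.zip_map, List.map_map]
  apply List.map_congr_left
  rintro ⟨a, b⟩ _
  simp

lemma pvSpecA_fst (cs : List Char) : ∀ (w : Int),
    (pvSpecA cs w).1 =
      (match pvPos cs with
       | [] => []
       | p :: ps => (w + p - 1) :: pvDiffsL (p :: ps)) := by
  induction cs with
  | nil => intro w; simp [pvSpecA, pvPos]
  | cons c cs ih =>
      intro w
      by_cases h : c = '*' ∨ c = '+'
      · simp only [pvSpecA, pvPos, if_pos h]
        rw [ih 1]
        cases hp : pvPos cs with
        | nil => simp [pvDiffsL]
        | cons p ps =>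
            simp only [List.map_cons, pvDiffsL_cons_cons]
            have hm : (p + 1) :: ps.map (· + 1) = (p :: ps).map (· + 1) := by simp
            rw [hm, pvDiffsL_map_add_one]
            exact congrArg₂ List.cons (by ring) (congrArg₂ List.cons (by ring) rfl)
      · simp only [pvSpecA, pvPos, if_neg h]
        rw [ih (w + 1)]
        cases hp : pvPos cs with
        | nil => simp
        | cons p ps =>
            simp only [List.map_cons]
            have hm : (p + 1) :: ps.map (· + 1) = (p :: ps).map (· + 1) := by simp
            rw [hm, pvDiffsL_map_add_one]
            exact congrArg₂ List.cons (by ring) rfl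

lemma pvSpecA_snd (cs : List Char) : ∀ (w : Int),
    (pvSpecA cs w).2 =
      (match (pvPos cs).getLast? with
       | none => w + cs.length
       | some q => (cs.length : Int) - q) := by
  induction cs with
  | nil => intro w; simp [pvSpecA, pvPos]
  | cons c cs ih =>
      intro w
      by_cases h : c = '*' ∨ c = '+'
      · simp only [pvSpecA, pvPos, if_pos h]
        rw [ih 1]
        cases hp : pvPos cs with
        | nil => simp only [List.map_nil]; simp; ring
        | cons p ps =>
            rw [List.map_cons, List.getLast?_cons_cons]
            have hlm := List.getLast?_map (f := fun x : Int => x + 1) (l := p :: ps)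
            simp only [List.map_cons] at hlm
            rw [hlm]
            cases hq : (p :: ps).getLast? with
            | none => simp at hq
            | some q =>
                simp only [Option.map_some, List.length_cons]
                push_cast
                ring
      · simp only [pvSpecA, pvPos, if_neg h]
        rw [ih (w + 1)]
        rw [List.getLast?_map]
        cases hq : (pvPos cs).getLast? with
        | none =>
            simp only [Option.map_none, List.length_cons]
            push_cast
            ring
        | some q =>
            simp only [Option.map_some, List.length_cons]
            push_cast
            ring

lemma pvPos_enum (cs : List Char) : ∀ (s : Int),
    (PySem.List.enumerate cs s).filterMap
      (fun ic => if ic.2 = '*' ∨ ic.2 = '+' then some ic.1 else none)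
    = (pvPos cs).map (· + s) := by
  induction cs with
  | nil => intro s; simp [PySem.List.enumerate_nil, pvPos]
  | cons c cs ih =>
      intro s
      have hm : (pvPos cs).map (· + (s + 1)) = ((pvPos cs).map (· + 1)).map (· + s) := by
        rw [List.map_map]
        apply List.map_congr_left
        intro a _
        simp
        ring
      by_cases h : c = '*' ∨ c = '+'
      · simp only [PySem.List.enumerate_cons, List.filterMap_cons, if_pos h, pvPos,
          ih (s + 1), hm, List.map_cons]
        exact congrArg₂ List.cons (by ring) rfl
      · simp only [PySem.List.enumerate_cons, List.filterMap_cons, if_neg h, pvPos,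
          ih (s + 1), hm]

-- ===== VERDICT (by name: the statement is the Claim_ definition above) =====
theorem discover_column_widths_spec : Claim_equal_discover_column_widths := by
  intro line _
  show discover_column_widths line = discover_column_widths_alt line
  show ((line.toList.foldl (fun (st : List Int × Int) c =>
      let st' := if c = '*' ∨ c = '+' then (st.1 ++ [st.2 - 1], (0 : Int)) else st
      (st'.1, st'.2 + 1)) ([], 1)).1
    ++ [(line.toList.foldl (fun (st : List Int × Int) c =>
      let st' := if c = '*' ∨ c = '+' then (st.1 ++ [st.2 - 1], (0 : Int)) else st
      (st'.1, st'.2 + 1)) ([], 1)).2]).drop 1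
    = discover_column_widths_alt line
  rw [pvFoldA line.toList [] 1]
  rw [pvSpecA_fst line.toList 1, pvSpecA_snd line.toList 1]
  show _ = (match (PySem.List.enumerate line.toList 0).filterMap
      (fun ic => if ic.2 = '*' ∨ ic.2 = '+' then some ic.1 else none) with
    | [] => ([] : List Int)
    | p :: ps =>
        ((p :: ps).zip ps).map (fun ab : Int × Int => ab.2 - ab.1 - 1)
          ++ [(line.toList.length : Int) - (p :: ps).getLast (by simp)])
  rw [pvPos_enum line.toList 0]
  have hmap0 : (pvPos line.toList).map (· + (0 : Int)) = pvPos line.toList := by simp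
  rw [hmap0]
  cases hp : pvPos line.toList with
  | nil => simp
  | cons p ps =>
      rw [List.getLast?_eq_some_getLast (l := p :: ps) (by simp)]
      simp [pvDiffsL]
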